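-- pv_equiv track=rewrite | github.com/allfine0/RL4VLA | scripts/align_ppo_sft_data.py | check_success_condition
-- ===== SOURCE A (Python) =====
-- from typing import Dict, List, Any, Tuple
--
-- def check_success_condition(info_list: List[Dict], min_success_steps: int = 6) -> bool:
--     """
--     检查episode是否满足成功条件
--
--     Args:
--         info_list: 环境信息列表
--         min_success_steps: 最小连续成功步数
--
--     Returns:
--         是否满足成功条件
--     """
--     success_count = 0
--     for info in info_list:
--         if info.get("success", False):
--             success_count += 1
--         else:
--             success_count = 0
--
--         if success_count >= min_success_steps:
--             return True
--
--     return False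
-- ===== SOURCE B (Python) =====
-- def check_success_condition(info_list, min_success_steps=6):
--     # Group-and-measure: walk runs of consecutive successes with two indices
--     # instead of a running counter with reset.
--     if min_success_steps <= 0:
--         return len(info_list) > 0
--     i, n = 0, len(info_list)
--     while i < n:
--         j = i
--         while j < n and info_list[j].get("success", False):
--             j += 1
--         if j - i >= min_success_steps:
--             return True
--         i = j + 1
--     return False
-- ===== Notes on version B (the rewrite author's own statement) =====
-- stated objective: alternative
-- what changed: Replaced the running success-counter with reset by a two-pointer group-and-measure scan: for each maximal run of consecutive successes it measures the run length and compares it to the threshold, with the non-positive threshold handled up front as 'list nonempty'.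
import Mathlib
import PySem

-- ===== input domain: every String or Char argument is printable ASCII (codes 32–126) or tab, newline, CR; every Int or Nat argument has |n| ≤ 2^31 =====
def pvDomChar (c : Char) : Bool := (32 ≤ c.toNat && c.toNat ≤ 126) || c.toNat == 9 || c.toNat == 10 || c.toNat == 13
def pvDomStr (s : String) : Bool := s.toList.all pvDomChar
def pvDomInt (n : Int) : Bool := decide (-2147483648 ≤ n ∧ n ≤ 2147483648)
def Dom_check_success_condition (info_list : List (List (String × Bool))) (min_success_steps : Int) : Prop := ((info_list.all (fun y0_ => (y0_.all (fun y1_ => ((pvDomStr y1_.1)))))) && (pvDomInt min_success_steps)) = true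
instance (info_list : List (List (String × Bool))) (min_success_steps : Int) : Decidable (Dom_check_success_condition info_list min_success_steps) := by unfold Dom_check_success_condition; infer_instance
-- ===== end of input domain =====

-- B replaces A's running success-counter with a two-pointer group-and-measure scan (alternative decomposition, same cost).


-- ===== PORT A =====
-- the for-loop over info_list with the running counter and early return
def pvALoop (l : List (List (String × Bool))) (cnt m : Int) : Bool :=
  match l with
  | [] => false
  | info :: rest =>
    let cnt' := if (PySem.Dict.mk info).getD "success" false then cnt + 1 else 0
    if cnt' ≥ m then true else pvALoop rest cnt' m

def check_success_condition (info_list : List (List (String × Bool))) (min_success_steps : Int) : Bool :=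
  pvALoop info_list 0 min_success_steps

-- ===== PORT B =====
-- inner while: advance j over consecutive successes starting at j
def pvBInner (l : List (List (String × Bool))) (j : Nat) : Nat :=
  if h : j < l.length then
    if (PySem.Dict.mk l[j]).getD "success" false then pvBInner l (j + 1) else j
  else j
termination_by l.length - j

theorem pvBInner_ge (l : List (List (String × Bool))) (j : Nat) : j ≤ pvBInner l j := by
  unfold pvBInner
  split
  · split
    · have := pvBInner_ge l (j + 1); omega
    · exact le_refl j
  · exact le_refl j
termination_by l.length - j

-- outer while over run starts
def pvBOuter (l : List (List (String × Bool))) (i : Nat) (m : Int) : Bool :=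
  if h : i < l.length then
    if (pvBInner l i : Int) - i ≥ m then true else pvBOuter l (pvBInner l i + 1) m
  else false
termination_by l.length - i
decreasing_by have := pvBInner_ge l i; omega

def check_success_condition_alt (info_list : List (List (String × Bool))) (min_success_steps : Int) : Bool :=
  if min_success_steps ≤ 0 then decide (info_list.length > 0)
  else pvBOuter info_list 0 min_success_steps

-- ===== PRECONDITION & SPEC =====
def Spec_check_success_condition (info_list : List (List (String × Bool))) (min_success_steps : Int) (out : Bool) : Prop := out = check_success_condition_alt info_list min_success_steps
instance (info_list : List (List (String × Bool))) (min_success_steps : Int) (out : Bool) : Decidable (Spec_check_success_condition info_list min_success_steps out) := by unfold Spec_check_success_condition; infer_instance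

-- ===== CLAIM (what is proved, stated in full; the proofs are below) =====
def Claim_equal_check_success_condition : Prop := ∀ (info_list : List (List (String × Bool))) (min_success_steps : Int), Dom_check_success_condition info_list min_success_steps → Spec_check_success_condition info_list min_success_steps (check_success_condition info_list min_success_steps)

-- ===== LEMMAS AND PROOFS =====

-- length of the success run at the head of the list (proof-side characterisation)
def pvRunLen (l : List (List (String × Bool))) : Nat :=
  match l with
  | [] => 0
  | info :: rest => if (PySem.Dict.mk info).getD "success" false then pvRunLen rest + 1 else 0

-- proof-side suffix form of B's scan
def pvScan (l : List (List (String × Bool))) (m : Int) : Bool :=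
  match l with
  | [] => false
  | info :: rest =>
    if (pvRunLen (info :: rest) : Int) ≥ m then true
    else pvScan ((info :: rest).drop (pvRunLen (info :: rest) + 1)) m
termination_by l.length
decreasing_by simp [List.length_drop]

theorem pvScan_nil (m : Int) : pvScan [] m = false := by
  rw [pvScan.eq_def]

theorem pvScan_cons (a : List (String × Bool)) (t : List (List (String × Bool))) (m : Int) :
    pvScan (a :: t) m =
      (if (pvRunLen (a :: t) : Int) ≥ m then true
       else pvScan ((a :: t).drop (pvRunLen (a :: t) + 1)) m) := by
  rw [pvScan.eq_def]

theorem pvScan_eq (l : List (List (String × Bool))) (m : Int) (hm : 1 ≤ m) :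
    pvScan l m = (if (pvRunLen l : Int) ≥ m then true else pvScan (l.drop (pvRunLen l + 1)) m) := by
  cases l with
  | nil =>
    rw [pvScan_nil]
    simp only [pvRunLen, Nat.cast_zero, List.drop_nil]
    rw [if_neg (by omega), pvScan_nil]
  | cons a t => rw [pvScan_cons]

theorem pvBInner_eq (l : List (List (String × Bool))) (i : Nat) :
    pvBInner l i = i + pvRunLen (l.drop i) := by
  unfold pvBInner
  split
  · rename_i h
    rw [List.drop_eq_getElem_cons h]
    unfold pvRunLen
    split
    · rw [pvBInner_eq l (i + 1)]; omega
    · omega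
  · rename_i h
    rw [List.drop_eq_nil_of_le (by omega)]
    simp [pvRunLen]
termination_by l.length - i

theorem pvBOuter_eq (l : List (List (String × Bool))) (i : Nat) (m : Int) (hm : 1 ≤ m) :
    pvBOuter l i m = pvScan (l.drop i) m := by
  unfold pvBOuter
  split
  · rename_i h
    rw [pvBInner_eq l i, pvScan_eq _ m hm, List.drop_drop]
    by_cases hge : (pvRunLen (l.drop i) : Int) ≥ m
    · rw [if_pos (by push_cast; omega), if_pos hge]
    · rw [if_neg (by push_cast; omega), if_neg hge,
        pvBOuter_eq l (i + pvRunLen (l.drop i) + 1) m hm]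
      congr 2
  · rename_i h
    rw [List.drop_eq_nil_of_le (by omega), pvScan_nil]
termination_by l.length - i
decreasing_by have := pvBInner_ge l i; omega

-- A's loop, characterised against pvScan
theorem pvALoop_eq (l : List (List (String × Bool))) (cnt m : Int)
    (hm : 1 ≤ m) (h0 : 0 ≤ cnt) (hlt : cnt < m) :
    pvALoop l cnt m = (if cnt + (pvRunLen l : Int) ≥ m then true else pvScan (l.drop (pvRunLen l + 1)) m) := by
  induction l generalizing cnt with
  | nil =>
    simp only [pvALoop, pvRunLen, Nat.cast_zero, add_zero, List.drop_nil]
    rw [if_neg (by omega), pvScan_nil]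
  | cons info rest ih =>
    rw [pvALoop]
    cases hs : (PySem.Dict.mk info).getD "success" false with
    | true =>
      simp only [pvRunLen, hs, if_true]
      by_cases hge : cnt + 1 ≥ m
      · rw [if_pos hge, if_pos (by push_cast; omega)]
      · rw [if_neg hge, ih (cnt + 1) (by omega) (by omega)]
        by_cases hc : cnt + 1 + (pvRunLen rest : Int) ≥ m
        · rw [if_pos hc, if_pos (by push_cast; omega)]
        · rw [if_neg hc, if_neg (by push_cast; omega)]
          simp [List.drop]
    | false =>
      simp only [pvRunLen, hs, Bool.false_eq_true, if_false, Nat.cast_zero, add_zero,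
        zero_add, List.drop_succ_cons, List.drop_zero]
      rw [if_neg (by omega), if_neg (by omega), ih 0 le_rfl (by omega),
        pvScan_eq rest m hm]
      simp only [zero_add]

theorem pvALoop_nonpos (l : List (List (String × Bool))) (m : Int) (hm : m ≤ 0) :
    pvALoop l 0 m = decide (l.length > 0) := by
  cases l with
  | nil => simp [pvALoop]
  | cons info rest =>
    rw [pvALoop]
    rw [if_pos (by split <;> omega)]
    simp

-- ===== VERDICT (by name: the statement is the Claim_ definition above) =====
theorem check_success_condition_spec : Claim_equal_check_success_condition := by
  intro l m _
  unfold Spec_check_success_condition check_success_condition check_success_condition_alt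
  by_cases hm : m ≤ 0
  · rw [if_pos hm, pvALoop_nonpos l m hm]
  · rw [if_neg hm, pvBOuter_eq l 0 m (by omega), List.drop_zero,
        pvALoop_eq l 0 m (by omega) (by omega) (by omega), pvScan_eq l m (by omega)]
    simp
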